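-- pv_equiv track=rewrite | github.com/IlyaSchneider10/Data-Mining | ex3_c.py | similarity_measure_kernel
-- ===== SOURCE A (Python) =====
-- def similarity_measure_kernel(seq1, seq2):
--
--     similarity=0
--
--     for position1 in range(len(seq1)-2):
--
--        s=seq1[position1:position1+3]
--
--        for position2 in range(len(seq2)-2):
--
--            s_=seq2[position2:position2+3]
--
--            if s[0]==s_[0] and s[0]=="G":
--
--                for p in range(3):
--
--                   if s[p]==s_[p]:
--
--                       similarity+=1
--
--     return similarity
-- ===== SOURCE B (Python) =====
-- def similarity_measure_kernel(seq1, seq2):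
--     # O(n+m): collect G-starting 3-grams, then combine per-offset character histograms
--     t1 = [seq1[i:i + 3] for i in range(len(seq1) - 2) if seq1[i] == "G"]
--     t2 = [seq2[j:j + 3] for j in range(len(seq2) - 2) if seq2[j] == "G"]
--     total = len(t1) * len(t2)
--     for p in (1, 2):
--         cnt = {}
--         for t in t2:
--             cnt[t[p]] = cnt.get(t[p], 0) + 1
--         for s in t1:
--             total += cnt.get(s[p], 0)
--     return total
-- ===== Notes on version B (the rewrite author's own statement) =====
-- stated objective: faster
-- what changed: Replaces the all-pairs scan over 3-gram pairs by collecting the G-starting 3-grams of each string once and combining per-offset character histograms (dict counts), so no pairwise loop remains.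
import Mathlib
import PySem

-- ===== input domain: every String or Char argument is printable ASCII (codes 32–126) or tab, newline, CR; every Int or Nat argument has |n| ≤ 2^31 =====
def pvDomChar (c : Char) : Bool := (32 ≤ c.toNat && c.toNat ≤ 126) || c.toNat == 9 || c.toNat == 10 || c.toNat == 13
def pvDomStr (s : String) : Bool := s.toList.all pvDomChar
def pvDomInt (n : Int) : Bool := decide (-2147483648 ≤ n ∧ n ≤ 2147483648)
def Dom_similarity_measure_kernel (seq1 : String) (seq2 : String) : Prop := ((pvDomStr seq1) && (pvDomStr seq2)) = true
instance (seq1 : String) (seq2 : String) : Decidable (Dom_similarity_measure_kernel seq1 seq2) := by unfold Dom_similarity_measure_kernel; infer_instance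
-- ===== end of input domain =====

-- B replaces A's all-pairs scan over 3-gram pairs by per-offset character histograms of the
-- G-starting 3-grams, combined multiplicatively (objective: faster, asymptotically).

-- ===== PORT A =====
def similarity_measure_kernel (seq1 : String) (seq2 : String) : Int :=
  let l1 := seq1.toList
  let l2 := seq2.toList
  (PySem.List.pyRange 0 ((l1.length : Int) - 2) 1).foldl (fun similarity position1 =>
    let s := PySem.List.slice l1 (some position1) (some (position1 + 3))
    (PySem.List.pyRange 0 ((l2.length : Int) - 2) 1).foldl (fun similarity position2 =>
      let s_ := PySem.List.slice l2 (some position2) (some (position2 + 3))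
      if PySem.List.pyGetD s 0 ' ' == PySem.List.pyGetD s_ 0 ' ' &&
         PySem.List.pyGetD s 0 ' ' == 'G' then
        (PySem.List.pyRange 0 3 1).foldl (fun similarity p =>
          if PySem.List.pyGetD s p ' ' == PySem.List.pyGetD s_ p ' ' then similarity + 1
          else similarity) similarity
      else similarity) similarity) 0

-- ===== PORT B =====
-- the list comprehension '[seq[i:i+3] for i in range(len(seq)-2) if seq[i] == "G"]'
def pvTriples (l : List Char) : List (List Char) :=
  ((PySem.List.pyRange 0 ((l.length : Int) - 2) 1).filter
      (fun i => PySem.List.pyGetD l i ' ' == 'G')).map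
    (fun i => PySem.List.slice l (some i) (some (i + 3)))

-- the loop 'for t in ts: cnt[t[p]] = cnt.get(t[p], 0) + 1'
def pvCounter (ts : List (List Char)) (p : Int) : PySem.Dict Char Int :=
  ts.foldl (fun cnt t => cnt.modify (PySem.List.pyGetD t p ' ') 0 (· + 1)) PySem.Dict.empty

def similarity_measure_kernel_alt (seq1 : String) (seq2 : String) : Int :=
  let t1 := pvTriples seq1.toList
  let t2 := pvTriples seq2.toList
  let total : Int := (t1.length : Int) * (t2.length : Int)
  [(1 : Int), 2].foldl (fun total p =>
    let cnt := pvCounter t2 p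
    t1.foldl (fun tot s => tot + cnt.getD (PySem.List.pyGetD s p ' ') 0) total) total

-- ===== PRECONDITION & SPEC =====
def Spec_similarity_measure_kernel (seq1 : String) (seq2 : String) (out : Int) : Prop := out = similarity_measure_kernel_alt seq1 seq2
instance (seq1 : String) (seq2 : String) (out : Int) : Decidable (Spec_similarity_measure_kernel seq1 seq2 out) := by unfold Spec_similarity_measure_kernel; infer_instance

-- ===== CLAIM (what is proved, stated in full; the proofs are below) =====
def Claim_equal_similarity_measure_kernel : Prop := ∀ (seq1 : String) (seq2 : String), Dom_similarity_measure_kernel seq1 seq2 → Spec_similarity_measure_kernel seq1 seq2 (similarity_measure_kernel seq1 seq2)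

-- ===== LEMMAS AND PROOFS =====

-- abbreviations for the proofs
def pvPg (l : List Char) (i : Int) : Char := PySem.List.pyGetD l i ' '
def pvSl (l : List Char) (i : Int) : List Char := PySem.List.slice l (some i) (some (i + 3))
def pvR (l : List Char) : List Int := PySem.List.pyRange 0 ((l.length : Int) - 2) 1
def pvG (l : List Char) : List Int := (pvR l).filter (fun i => pvPg l i == 'G')
def pvW (l1 l2 : List Char) (i j : Int) : Int :=
  if pvPg (pvSl l1 i) 0 == pvPg (pvSl l2 j) 0 && pvPg (pvSl l1 i) 0 == 'G' then
    (((PySem.List.pyRange 0 3 1).countP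
        (fun p => pvPg (pvSl l1 i) p == pvPg (pvSl l2 j) p) : Nat) : Int)
  else 0

lemma pv_foldl_body {β : Type} (l : List β) (f : Int → β → Int) (g : β → Int)
    (h : ∀ sim x, f sim x = sim + g x) (a : Int) :
    l.foldl f a = a + (l.map g).sum := by
  induction l generalizing a with
  | nil => simp
  | cons x xs ih => simp [h, ih, add_assoc]

lemma pv_mem_R {l : List Char} {i : Int} (h : i ∈ pvR l) :
    0 ≤ i ∧ i < (l.length : Int) - 2 := by
  simpa [pvR, PySem.List.mem_pyRange_one] using h

lemma pv_mem_G {l : List Char} {i : Int} (h : i ∈ pvG l) :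
    i ∈ pvR l ∧ pvPg l i = 'G' := by
  have := List.mem_filter.mp h
  exact ⟨this.1, by simpa using this.2⟩

-- indexing a 3-slice is indexing the string
lemma pv_pg_sl {l : List Char} {i : Int} (p : Int) (h0 : 0 ≤ i)
    (h2 : i < (l.length : Int) - 2) (hp0 : 0 ≤ p) (hp : p < 3) :
    pvPg (pvSl l i) p = pvPg l (i + p) := by
  have hlen : i.toNat + 3 ≤ l.length := by omega
  have hsl : pvSl l i = List.take 3 (List.drop i.toNat l) := by
    rw [pvSl, PySem.List.slice_toNat l h0 (by omega)]
    congr 1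
    omega
  have hlen3 : (List.take 3 (List.drop i.toNat l)).length = 3 := by
    simp [List.length_take, List.length_drop]
    omega
  rw [pvPg, pvPg, hsl]
  rw [PySem.List.pyGetD_eq_getElem _ _ hp0 (by rw [hlen3]; omega)]
  rw [PySem.List.pyGetD_eq_getElem _ _ (by omega) (by omega)]
  rw [List.getElem_take, List.getElem_drop]
  congr 1
  omega

-- drop the summands on which f vanishes
lemma pv_sum_filter {α : Type} (l : List α) (p : α → Bool) (f : α → Int)
    (h : ∀ x ∈ l, p x = false → f x = 0) :
    (l.map f).sum = ((l.filter p).map f).sum := by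
  induction l with
  | nil => rfl
  | cons x xs ih =>
    by_cases hx : p x
    · simp [hx, ih (fun y hy => h y (List.mem_cons_of_mem _ hy))]
    · simp [hx, h x (List.mem_cons_self) (by simpa using hx),
        ih (fun y hy => h y (List.mem_cons_of_mem _ hy))]

-- A as a double sum of pvW
lemma pv_A_eq (seq1 seq2 : String) :
    similarity_measure_kernel seq1 seq2 =
      ((pvR seq1.toList).map
        (fun i => ((pvR seq2.toList).map (pvW seq1.toList seq2.toList i)).sum)).sum := by
  unfold similarity_measure_kernel
  refine (pv_foldl_body _ _
      (fun i => ((pvR seq2.toList).map (pvW seq1.toList seq2.toList i)).sum) ?_ 0).trans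
    (by simp only [zero_add, pvR])
  intro sim i
  refine pv_foldl_body _ _ (pvW seq1.toList seq2.toList i) ?_ sim
  intro sim' j
  by_cases h : (pvPg (pvSl seq1.toList i) 0 == pvPg (pvSl seq2.toList j) 0 &&
      pvPg (pvSl seq1.toList i) 0 == 'G') = true
  · rw [if_pos (by simpa [pvPg, pvSl] using h), PySem.List.foldl_count_if]
    simp only [pvW, pvPg, pvSl]
    rw [if_pos (by simpa [pvPg, pvSl] using h)]
  · rw [if_neg (by simpa [pvPg, pvSl] using h)]
    simp only [pvW, pvPg, pvSl]
    rw [if_neg (by simpa [pvPg, pvSl] using h), add_zero]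

lemma pv_triples_eq (l : List Char) : pvTriples l = (pvG l).map (fun i => pvSl l i) := rfl

lemma pv_counter_getD (ts : List (List Char)) (p : Int) (k : Char) :
    (pvCounter ts p).getD k 0 =
      ((ts.map (fun t => PySem.List.pyGetD t p ' ')).count k : Int) := by
  rw [pvCounter, ← List.foldl_map (f := fun t => PySem.List.pyGetD t p ' ')
      (g := fun (d : PySem.Dict Char Int) x => d.modify x 0 (· + 1)),
    PySem.Dict.getD_foldl_modify_add_one]
  norm_num [show (PySem.Dict.empty : PySem.Dict Char Int).getD k 0 = 0 from rfl]

-- B as histogram products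
lemma pv_B_eq (seq1 seq2 : String) :
    similarity_measure_kernel_alt seq1 seq2 =
      ((pvG seq1.toList).length : Int) * ((pvG seq2.toList).length : Int) +
      ((pvG seq1.toList).map (fun i =>
        (((pvG seq2.toList).countP
            (fun j => pvPg seq1.toList (i + 1) == pvPg seq2.toList (j + 1)) : Nat) : Int))).sum +
      ((pvG seq1.toList).map (fun i =>
        (((pvG seq2.toList).countP
            (fun j => pvPg seq1.toList (i + 2) == pvPg seq2.toList (j + 2)) : Nat) : Int))).sum := by
  have hsum : ∀ (p total : Int),
      (pvTriples seq1.toList).foldl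
        (fun tot s => tot + (pvCounter (pvTriples seq2.toList) p).getD (PySem.List.pyGetD s p ' ') 0) total
      = total + ((pvTriples seq1.toList).map
          (fun s => (pvCounter (pvTriples seq2.toList) p).getD (PySem.List.pyGetD s p ' ') 0)).sum := by
    intro p total
    exact pv_foldl_body _ _ _ (fun _ _ => rfl) total
  have hmap : ∀ (p : Int), 0 ≤ p → p < 3 →
      ((pvTriples seq1.toList).map
          (fun s => (pvCounter (pvTriples seq2.toList) p).getD (PySem.List.pyGetD s p ' ') 0)).sum
      = ((pvG seq1.toList).map (fun i =>
          (((pvG seq2.toList).countP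
              (fun j => pvPg seq1.toList (i + p) == pvPg seq2.toList (j + p)) : Nat) : Int))).sum := by
    intro p hp0 hp3
    rw [pv_triples_eq seq1.toList, List.map_map]
    congr 1
    refine List.map_congr_left ?_
    intro i hi
    obtain ⟨hiR, _⟩ := pv_mem_G hi
    obtain ⟨hi0, hi2⟩ := pv_mem_R hiR
    show (pvCounter (pvTriples seq2.toList) p).getD (PySem.List.pyGetD (pvSl seq1.toList i) p ' ') 0 = _
    rw [pv_counter_getD]
    have hkey : PySem.List.pyGetD (pvSl seq1.toList i) p ' ' = pvPg seq1.toList (i + p) :=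
      pv_pg_sl p hi0 hi2 hp0 hp3
    rw [hkey, pv_triples_eq seq2.toList, List.map_map, List.count_eq_countP, List.countP_map]
    congr 1
    refine List.countP_congr ?_
    intro j hj
    obtain ⟨hjR, _⟩ := pv_mem_G hj
    obtain ⟨hj0, hj2⟩ := pv_mem_R hjR
    show ((pvPg (pvSl seq2.toList j) p == pvPg seq1.toList (i + p)) = true) ↔ _
    rw [pv_pg_sl p hj0 hj2 hp0 hp3]
    rw [Bool.beq_comm]
  unfold similarity_measure_kernel_alt
  simp only [List.foldl_cons, List.foldl_nil]
  rw [hsum, hsum, hmap 1 (by norm_num) (by norm_num), hmap 2 (by norm_num) (by norm_num)]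
  rw [pv_triples_eq seq1.toList, pv_triples_eq seq2.toList, List.length_map, List.length_map]

-- the double sum factorises into the histogram products
lemma pv_bridge (l1 l2 : List Char) :
    ((pvR l1).map (fun i => ((pvR l2).map (pvW l1 l2 i)).sum)).sum =
      ((pvG l1).length : Int) * ((pvG l2).length : Int) +
      ((pvG l1).map (fun i =>
        (((pvG l2).countP (fun j => pvPg l1 (i + 1) == pvPg l2 (j + 1)) : Nat) : Int))).sum +
      ((pvG l1).map (fun i =>
        (((pvG l2).countP (fun j => pvPg l1 (i + 2) == pvPg l2 (j + 2)) : Nat) : Int))).sum := by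
  have hpg0 : ∀ (l : List Char) (i : Int), i ∈ pvR l → pvPg (pvSl l i) 0 = pvPg l i := by
    intro l i hi
    obtain ⟨h0, h2⟩ := pv_mem_R hi
    rw [pv_pg_sl 0 h0 h2 (by norm_num) (by norm_num), add_zero]
  have houter : ∀ i ∈ pvR l1, (pvPg l1 i == 'G') = false →
      ((pvR l2).map (pvW l1 l2 i)).sum = 0 := by
    intro i hiR hne
    have hzero : ∀ j ∈ pvR l2, pvW l1 l2 i j = (fun _ => (0 : Int)) j := by
      intro j _
      simp only [pvW, hpg0 l1 i hiR]
      rw [if_neg]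
      intro hc
      rw [Bool.and_eq_true, beq_iff_eq, beq_iff_eq] at hc
      simp [hc.2] at hne
    rw [List.map_congr_left hzero, PySem.List.sum_map_const_int, mul_zero]
  rw [pv_sum_filter (pvR l1) (fun i => pvPg l1 i == 'G')
      (fun i => ((pvR l2).map (pvW l1 l2 i)).sum) houter]
  have hper : ∀ i ∈ (pvR l1).filter (fun i => pvPg l1 i == 'G'),
      ((pvR l2).map (pvW l1 l2 i)).sum =
        (fun i => ((pvG l2).length : Int) +
          (((pvG l2).countP (fun j => pvPg l1 (i + 1) == pvPg l2 (j + 1)) : Nat) : Int) +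
          (((pvG l2).countP (fun j => pvPg l1 (i + 2) == pvPg l2 (j + 2)) : Nat) : Int)) i := by
    intro i hi
    have hmem := List.mem_filter.mp hi
    have hiR := hmem.1
    have hGi : pvPg l1 i = 'G' := by simpa using hmem.2
    obtain ⟨hi0, hi2⟩ := pv_mem_R hiR
    have hinner : ∀ j ∈ pvR l2, (pvPg l2 j == 'G') = false → pvW l1 l2 i j = 0 := by
      intro j hjR hjne
      simp only [pvW, hpg0 l1 i hiR, hpg0 l2 j hjR, hGi]
      rw [if_neg]
      intro hc
      rw [Bool.and_eq_true, beq_iff_eq, beq_iff_eq] at hc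
      simp [← hc.1] at hjne
    rw [pv_sum_filter (pvR l2) (fun j => pvPg l2 j == 'G') (pvW l1 l2 i) hinner]
    have helem : ∀ j ∈ (pvR l2).filter (fun j => pvPg l2 j == 'G'),
        pvW l1 l2 i j = (fun j => (1 : Int) +
          (if pvPg l1 (i + 1) == pvPg l2 (j + 1) then (1 : Int) else 0) +
          (if pvPg l1 (i + 2) == pvPg l2 (j + 2) then (1 : Int) else 0)) j := by
      intro j hj
      have hmem2 := List.mem_filter.mp hj
      have hjR := hmem2.1
      have hGj : pvPg l2 j = 'G' := by simpa using hmem2.2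
      obtain ⟨hj0, hj2⟩ := pv_mem_R hjR
      have e1 := pv_pg_sl (l := l1) 1 hi0 hi2 (by norm_num) (by norm_num)
      have e2 := pv_pg_sl (l := l1) 2 hi0 hi2 (by norm_num) (by norm_num)
      have f1 := pv_pg_sl (l := l2) 1 hj0 hj2 (by norm_num) (by norm_num)
      have f2 := pv_pg_sl (l := l2) 2 hj0 hj2 (by norm_num) (by norm_num)
      simp only [pvW, hpg0 l1 i hiR, hpg0 l2 j hjR, hGi, hGj]
      rw [if_pos (by simp)]
      rw [show PySem.List.pyRange 0 3 1 = [0, 1, 2] from by decide]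
      by_cases h1 : (pvPg l1 (i + 1) == pvPg l2 (j + 1)) = true <;>
        by_cases h2 : (pvPg l1 (i + 2) == pvPg l2 (j + 2)) = true <;>
        simp [hpg0 l1 i hiR, hpg0 l2 j hjR, hGi, hGj, e1, e2, f1, f2, h1, h2]
    rw [List.map_congr_left helem]
    simp only [PySem.List.sum_map_add_int, PySem.List.sum_map_const_int,
      PySem.List.sum_map_ite_one_zero, mul_one, pvG]
  rw [List.map_congr_left hper]
  simp only [PySem.List.sum_map_add_int, PySem.List.sum_map_const_int, pvG]

-- ===== VERDICT (by name: the statement is the Claim_ definition above) =====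
theorem similarity_measure_kernel_spec : Claim_equal_similarity_measure_kernel := by
  intro seq1 seq2 _
  unfold Spec_similarity_measure_kernel
  rw [pv_A_eq, pv_B_eq, pv_bridge]
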